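-- pv_equiv track=rewrite | github.com/YogeshKumar805/POTD-Geeks-For-Geeks | Subset XOR.py | subsetXOR
-- ===== SOURCE A (Python) =====
-- def subsetXOR(n : int):
--     # code here
--     x=0
--     for i in range(1,n+1):
--         x^=i
--     if x==n:
--         return [i for i in range(1,n+1)]
--     missing=x^n
--     if missing>0 and missing<n:
--         return [i for i in range(1,n+1) if i!=missing]
--     if missing==n:
--        return [i for i in range(1,n)]
-- ===== SOURCE B (Python) =====
-- def subsetXOR(n: int):
--     # Closed form: XOR(1..n) depends only on n % 4, so we know which element
--     # to drop without any accumulation loop.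
--     if n < 1:
--         return []
--     r = n % 4
--     if r == 0:
--         return list(range(1, n + 1))
--     if r == 1:
--         return [i for i in range(1, n + 1) if i != n - 1]
--     if r == 2:
--         return [i for i in range(1, n + 1) if i != 1]
--     return list(range(1, n))
-- ===== Notes on version B (the rewrite author's own statement) =====
-- stated objective: alternative
-- what changed: Replaced the XOR-accumulation loop over the whole range with a direct branch on the remainder of n modulo four, using the closed form of XOR(1..n) to determine which element to drop without computing any XOR.
import Mathlib
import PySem

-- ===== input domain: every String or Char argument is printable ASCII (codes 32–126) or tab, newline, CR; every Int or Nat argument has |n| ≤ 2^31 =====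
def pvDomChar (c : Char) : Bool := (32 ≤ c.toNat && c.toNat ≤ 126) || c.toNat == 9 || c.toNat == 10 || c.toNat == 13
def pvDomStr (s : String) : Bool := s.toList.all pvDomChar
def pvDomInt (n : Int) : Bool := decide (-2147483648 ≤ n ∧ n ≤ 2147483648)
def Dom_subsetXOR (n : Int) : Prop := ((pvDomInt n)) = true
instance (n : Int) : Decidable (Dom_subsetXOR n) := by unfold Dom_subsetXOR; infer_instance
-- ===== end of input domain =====

-- B replaces A's XOR-accumulation loop by a branch on n % 4 (closed form of XOR(1..n)).

-- ===== PORT A =====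
-- literal transliteration of A: accumulate x = XOR(1..n), then branch on x and missing = x ^ n.
def subsetXOR (n : Int) : List Int :=
  let x := (PySem.List.pyRange 1 (n+1) 1).foldl (fun a i => PySem.Int.bxor a i) 0
  if x = n then PySem.List.pyRange 1 (n+1) 1
  else
    let missing := PySem.Int.bxor x n
    if 0 < missing ∧ missing < n then (PySem.List.pyRange 1 (n+1) 1).filter (fun i => i != missing)
    else if missing = n then PySem.List.pyRange 1 n 1
    else []  -- Python falls off the end here (returns None); this branch is unreachable for every Int n

-- ===== PORT B =====
-- literal transliteration of B: guard n < 1, then branch on n % 4.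
def subsetXOR_alt (n : Int) : List Int :=
  if n < 1 then []
  else
    let r := PySem.Int.mod n 4
    if r = 0 then PySem.List.pyRange 1 (n+1) 1
    else if r = 1 then (PySem.List.pyRange 1 (n+1) 1).filter (fun i => i != (n-1))
    else if r = 2 then (PySem.List.pyRange 1 (n+1) 1).filter (fun i => i != 1)
    else PySem.List.pyRange 1 n 1

-- ===== PRECONDITION & SPEC =====
def Spec_subsetXOR (n : Int) (out : List Int) : Prop := out = subsetXOR_alt n
instance (n : Int) (out : List Int) : Decidable (Spec_subsetXOR n out) := by unfold Spec_subsetXOR; infer_instance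

-- ===== CLAIM (what is proved, stated in full; the proofs are below) =====
def Claim_equal_subsetXOR : Prop := ∀ (n : Int), Dom_subsetXOR n → Spec_subsetXOR n (subsetXOR n)

-- ===== LEMMAS AND PROOFS =====

-- even k, then k ^^^ 1 = k + 1 (Nat, bit flip of bit 0)
theorem pv_two_mul_xor_one (j : Nat) : (2*j) ^^^ 1 = 2*j+1 := by
  apply Nat.eq_of_testBit_eq
  intro i
  cases i with
  | zero => simp
  | succ i => simp [Nat.testBit_succ]

theorem pv_two_mul_xor_succ (j : Nat) : (2*j) ^^^ (2*j+1) = 1 := by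
  rw [← pv_two_mul_xor_one j, ← Nat.xor_assoc]
  simp

theorem pv_succ_xor_two_mul (j : Nat) : (2*j+1) ^^^ (2*j) = 1 := by
  rw [Nat.xor_comm]; exact pv_two_mul_xor_succ j

theorem pv_one_xor_odd (j : Nat) : 1 ^^^ (2*j+1) = 2*j := by
  rw [Nat.xor_comm, ← pv_two_mul_xor_one j, Nat.xor_assoc]
  simp

-- closed form of the accumulation loop of A
theorem pv_xor_range (m : Nat) :
    (PySem.List.pyRange 1 ((m:Int)+1) 1).foldl (fun a i => PySem.Int.bxor a i) 0 =
      (if m % 4 = 0 then (m:Int) else if m % 4 = 1 then 1 else if m % 4 = 2 then (m:Int)+1 else 0) := by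
  induction m with
  | zero => simp [PySem.List.pyRange_one_eq_nil]
  | succ m ih =>
    have hsplit : PySem.List.pyRange 1 (((m:Int)+1)+1) 1
        = PySem.List.pyRange 1 ((m:Int)+1) 1 ++ [(m:Int)+1] :=
      PySem.List.pyRange_one_succ_right (by omega)
    have hcast : ((m+1 : Nat) : Int) + 1 = ((m:Int)+1)+1 := by push_cast; ring
    rw [hcast, hsplit, List.foldl_append, ih]
    simp only [List.foldl_cons, List.foldl_nil]
    rcases (by omega : m % 4 = 0 ∨ m % 4 = 1 ∨ m % 4 = 2 ∨ m % 4 = 3) with h | h | h | h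
    · -- x was m (even), new x = m ^ (m+1) = 1
      obtain ⟨j, hj⟩ : ∃ j, m = 2*j := ⟨m/2, by omega⟩
      have h4 : (m+1) % 4 = 1 := by omega
      subst hj
      simp only [h, h4]
      norm_num
      rw [show ((2:Int)*(j:Int)) = (((2*j : Nat)) : Int) by push_cast; ring,
          show (((2*j:Nat)):Int)+1 = (((2*j+1 : Nat)) : Int) by push_cast; ring,
          PySem.Int.bxor_natCast, pv_two_mul_xor_succ]
      rfl
    · -- x was 1, new x = 1 ^ (m+1) = m+2 (m+1 even)
      obtain ⟨j, hj⟩ : ∃ j, m + 1 = 2*j := ⟨(m+1)/2, by omega⟩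
      have h4 : (m+1) % 4 = 2 := by omega
      simp only [h, h4]
      norm_num
      rw [show ((m:Int)+1) = (((2*j : Nat)) : Int) by push_cast; omega,
          show ((1:Int)) = (((1 : Nat)) : Int) by norm_num,
          PySem.Int.bxor_natCast]
      rw [Nat.xor_comm, pv_two_mul_xor_one]
      push_cast; omega
    · -- x was m+1, new x = (m+1) ^ (m+1) = 0
      have h4 : (m+1) % 4 = 3 := by omega
      simp only [h, h4]
      norm_num [PySem.Int.bxor_self]
    · -- x was 0, new x = m+1
      have h4 : (m+1) % 4 = 0 := by omega
      simp only [h, h4]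
      norm_num
      rw [PySem.Int.bxor_comm, PySem.Int.bxor_zero]

-- ===== VERDICT (by name: the statement is the Claim_ definition above) =====
theorem subsetXOR_spec : Claim_equal_subsetXOR := by
  intro n _
  unfold Spec_subsetXOR subsetXOR subsetXOR_alt
  by_cases hn : n < 1
  · -- n ≤ 0: A's range is empty, both sides reduce to []
    have hr : PySem.List.pyRange 1 (n+1) 1 = [] := PySem.List.pyRange_one_eq_nil (by omega)
    have hr' : PySem.List.pyRange 1 n 1 = [] := PySem.List.pyRange_one_eq_nil (by omega)
    have hb0 : PySem.Int.bxor 0 n = n := by rw [PySem.Int.bxor_comm, PySem.Int.bxor_zero]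
    simp only [hr, hr', List.foldl_nil, hb0, if_pos hn]
    by_cases h0 : (0:Int) = n
    · simp
    · rw [if_neg h0, if_neg (by omega : ¬((0:Int) < n ∧ n < n))]
      simp
  · -- 1 ≤ n
    rw [not_lt] at hn
    obtain ⟨m, rfl⟩ : ∃ m : Nat, n = (m:Int) := ⟨n.toNat, (Int.toNat_of_nonneg (by omega)).symm⟩
    have hm : 1 ≤ m := by exact_mod_cast hn
    have hx := pv_xor_range m
    have hmod : PySem.Int.mod (m:Int) 4 = ((m % 4 : Nat) : Int) := PySem.Int.mod_natCast m 4
    rw [hx, if_neg (by omega : ¬((m:Int) < 1)), hmod]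
    rcases (by omega : m % 4 = 0 ∨ m % 4 = 1 ∨ m % 4 = 2 ∨ m % 4 = 3) with h | h | h | h
    · -- x = n: full list on both sides
      simp only [h]; norm_num
    · -- x = 1: drop n-1 (at n = 1 nothing is dropped on either side)
      simp only [h]
      rcases (by omega : m = 1 ∨ 2 ≤ m) with rfl | hm2
      · decide
      · obtain ⟨j, hj⟩ : ∃ j, m = 2*j+1 := ⟨m/2, by omega⟩
        have hmiss : PySem.Int.bxor 1 (m:Int) = (m:Int) - 1 := by
          rw [show ((1:Int)) = (((1:Nat)):Int) from rfl, hj,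
              show (((2*j+1:Nat)):Int) = ((2*j+1:Nat):Int) from rfl,
              PySem.Int.bxor_natCast, pv_one_xor_odd]
          push_cast; ring
        have hne : ¬((1:Int) = (m:Int)) := by omega
        have h1 : (0:Int) < (m:Int) - 1 := by omega
        have h2 : (m:Int) - 1 < (m:Int) := by omega
        norm_num [hne, hmiss, h1, h2]
        omega
    · -- x = n+1: missing = 1, drop 1
      simp only [h]
      obtain ⟨j, hj⟩ : ∃ j, m = 2*j := ⟨m/2, by omega⟩
      have hmiss : PySem.Int.bxor ((m:Int)+1) (m:Int) = 1 := by
        rw [hj, show ((2*j:Nat):Int)+1 = (((2*j+1:Nat)):Int) by push_cast; ring,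
            PySem.Int.bxor_natCast, pv_succ_xor_two_mul]
        rfl
      have hne : ¬((m:Int)+1 = (m:Int)) := by omega
      have h2 : (1:Int) < (m:Int) := by omega
      norm_num [hne, hmiss, h2]
    · -- x = 0: missing = n, drop n itself
      simp only [h]
      have hb0 : PySem.Int.bxor 0 (m:Int) = (m:Int) := by
        rw [PySem.Int.bxor_comm, PySem.Int.bxor_zero]
      have hne : ¬((0:Int) = (m:Int)) := by omega
      have hlt : ¬((m:Int) < (m:Int)) := by omega
      norm_num [hne, hb0, hlt]
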